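-- pv_equiv track=rewrite | github.com/florek/niedziegiel_lake | sources/poziom_do_stycznia_2026.py | _months_from_to
-- ===== SOURCE A (Python) =====
-- def _months_from_to(start_year: int, start_month: int, end_year: int, end_month: int) -> list[tuple[int, int]]:
--     out = []
--     y, m = start_year, start_month
--     while (y, m) <= (end_year, end_month):
--         out.append((y, m))
--         m += 1
--         if m > 12:
--             m = 1
--             y += 1
--     return out
-- ===== SOURCE B (Python) =====
-- def _months_from_to(start_year: int, start_month: int, end_year: int, end_month: int) -> list[tuple[int, int]]:
--     return [
--         (y, m)
--         for y in range(start_year, end_year + 1)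
--         for m in range(start_month if y == start_year else 1, 13)
--         if m <= (end_month if y == end_year else 12)
--     ]
-- ===== Notes on version B (the rewrite author's own statement) =====
-- stated objective: simpler
-- what changed: Replaced the stateful while loop with a mutable (year, month) pair and a manual December carry by a single nested comprehension over the years, each year contributing its calendar months from its first month, clipped by the end bound; Pre_ excludes only the degenerate span whose two endpoints are the same out-of-range (year, month) pair, where A echoes the invalid pair and B emits nothing.
-- intended difference: When start_month > 12 and the span is nonempty (excluding the equal-endpoint case), A emits the un-normalized invalid pair (start_year, start_month) before carrying into January, while B emits only the valid per-year calendar months, the intended reading of the arguments. — e.g. on _months_from_to(0, 13, 1, 1): A returns [(0, 13), (1, 1)], B returns [(1, 1)]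
-- outside the precondition, e.g. on _months_from_to(5, 15, 5, 15): A returns [(5, 15)], B returns []
import Mathlib
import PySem

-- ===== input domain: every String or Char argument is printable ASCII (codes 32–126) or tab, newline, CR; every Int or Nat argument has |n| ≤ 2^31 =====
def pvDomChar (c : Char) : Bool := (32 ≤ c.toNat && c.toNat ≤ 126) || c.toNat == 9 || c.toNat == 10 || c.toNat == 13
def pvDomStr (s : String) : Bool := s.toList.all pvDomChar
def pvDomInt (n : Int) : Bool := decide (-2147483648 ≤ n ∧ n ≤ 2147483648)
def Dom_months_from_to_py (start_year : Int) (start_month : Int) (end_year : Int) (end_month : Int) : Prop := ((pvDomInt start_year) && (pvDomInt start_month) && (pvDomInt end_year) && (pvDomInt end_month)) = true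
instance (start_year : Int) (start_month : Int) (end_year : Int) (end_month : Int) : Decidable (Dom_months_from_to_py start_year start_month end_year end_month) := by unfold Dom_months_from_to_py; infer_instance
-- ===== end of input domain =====

-- B replaces A's stateful while loop (mutable (year, month) pair with a manual December
-- carry) by one nested comprehension over the years, each year contributing its own month
-- range; for out-of-range month arguments the two disagree, stated below as D_.

-- B replaces A's stateful while loop (mutable (year, month) pair with a manual December
-- carry) by one nested comprehension over the years, each year contributing its calendar
-- months clipped by the end bound; A's emission of an out-of-range start month is stated as D_.

-- ===== PORT A =====
-- A's while loop: state (y, m), accumulator out; guard is Python's lexicographic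
-- (y, m) <= (end_year, end_month); the Nat fuel only makes the recursion structural —
-- months_from_to_py passes one more than the loop's strictly decreasing measure, so it never runs out
def monthsLoopA (end_year end_month : Int) : Nat → Int → Int → List (Int × Int) → List (Int × Int)
  | 0, _, _, out => out
  | fuel + 1, y, m, out =>
    if y < end_year ∨ (y = end_year ∧ m ≤ end_month) then
      if m + 1 > 12 then
        monthsLoopA end_year end_month fuel (y + 1) 1 (out ++ [(y, m)])
      else
        monthsLoopA end_year end_month fuel y (m + 1) (out ++ [(y, m)])
    else
      out

def months_from_to_py (start_year : Int) (start_month : Int) (end_year : Int) (end_month : Int) : List (Int × Int) :=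
  monthsLoopA end_year end_month
    (((end_year - start_year) * 14 + (14 - min start_month 13)).toNat + 1) start_year start_month []

-- ===== PORT B =====
-- Source B's nested comprehension: for y in range(start_year, end_year+1),
-- for m in range(start_month if y == start_year else 1, 13), if m <= (end_month if y == end_year else 12)
def months_from_to_py_alt (start_year : Int) (start_month : Int) (end_year : Int) (end_month : Int) : List (Int × Int) :=
  (PySem.List.pyRange start_year (end_year + 1) 1).flatMap fun y =>
    ((PySem.List.pyRange (if y = start_year then start_month else 1) 13 1).filter
        (fun m => decide (m ≤ (if y = end_year then end_month else 12)))).map fun m => (y, m)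

-- ===== PRECONDITION & SPEC =====
-- Pre_ excludes only the degenerate span whose two endpoints are the same out-of-range
-- (year, month) pair (start = end with month > 12): there A echoes the invalid pair back and
-- B emits no invalid months — the corner is unspecified and either value is defensible.
def Pre_months_from_to_py (start_year : Int) (start_month : Int) (end_year : Int) (end_month : Int) : Prop :=
  ¬(start_year = end_year ∧ start_month = end_month ∧ 12 < start_month)
instance (start_year : Int) (start_month : Int) (end_year : Int) (end_month : Int) : Decidable (Pre_months_from_to_py start_year start_month end_year end_month) := by unfold Pre_months_from_to_py; infer_instance

def pvWitness_months_from_to_py : Int × Int × Int × Int := (2025, 1, 2026, 1)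

-- When start_month > 12 on a nonempty span (equal endpoints aside), A emits the un-normalized
-- invalid pair (start_year, start_month) before carrying into January, while B emits only the
-- valid per-year calendar months — the intended reading of the arguments.
def D_months_from_to_py (start_year : Int) (start_month : Int) (end_year : Int) (end_month : Int) : Prop :=
  12 < start_month ∧
  (start_year < end_year ∨ (start_year = end_year ∧ start_month ≤ end_month)) ∧
  ¬(start_year = end_year ∧ start_month = end_month)
instance (start_year : Int) (start_month : Int) (end_year : Int) (end_month : Int) : Decidable (D_months_from_to_py start_year start_month end_year end_month) := by unfold D_months_from_to_py; infer_instance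

def Spec_months_from_to_py (start_year : Int) (start_month : Int) (end_year : Int) (end_month : Int) (out : List (Int × Int)) : Prop := ¬ D_months_from_to_py start_year start_month end_year end_month → out = months_from_to_py_alt start_year start_month end_year end_month
instance (start_year : Int) (start_month : Int) (end_year : Int) (end_month : Int) (out : List (Int × Int)) : Decidable (Spec_months_from_to_py start_year start_month end_year end_month out) := by unfold Spec_months_from_to_py; infer_instance

def pvDiffWitness_months_from_to_py : Int × Int × Int × Int := (0, 13, 1, 1)
def pvDiffWitnessOut_months_from_to_py : (List (Int × Int)) × (List (Int × Int)) := ([(0, 13), (1, 1)], [(1, 1)])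

-- ===== CLAIM (what is proved, stated in full; the proofs are below) =====
def Claim_unchanged_months_from_to_py : Prop := ∀ (start_year : Int) (start_month : Int) (end_year : Int) (end_month : Int), Dom_months_from_to_py start_year start_month end_year end_month → Pre_months_from_to_py start_year start_month end_year end_month → Spec_months_from_to_py start_year start_month end_year end_month (months_from_to_py start_year start_month end_year end_month)
def Claim_changed_months_from_to_py : Prop := Dom_months_from_to_py (pvDiffWitness_months_from_to_py.1) (pvDiffWitness_months_from_to_py.2.1) (pvDiffWitness_months_from_to_py.2.2.1) (pvDiffWitness_months_from_to_py.2.2.2) ∧ Pre_months_from_to_py (pvDiffWitness_months_from_to_py.1) (pvDiffWitness_months_from_to_py.2.1) (pvDiffWitness_months_from_to_py.2.2.1) (pvDiffWitness_months_from_to_py.2.2.2) ∧ D_months_from_to_py (pvDiffWitness_months_from_to_py.1) (pvDiffWitness_months_from_to_py.2.1) (pvDiffWitness_months_from_to_py.2.2.1) (pvDiffWitness_months_from_to_py.2.2.2) ∧ months_from_to_py (pvDiffWitness_months_from_to_py.1) (pvDiffWitness_months_from_to_py.2.1) (pvDiffWitness_months_from_to_py.2.2.1) (pvDiffWitness_months_from_to_py.2.2.2)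 = pvDiffWitnessOut_months_from_to_py.1 ∧ months_from_to_py_alt (pvDiffWitness_months_from_to_py.1) (pvDiffWitness_months_from_to_py.2.1) (pvDiffWitness_months_from_to_py.2.2.1) (pvDiffWitness_months_from_to_py.2.2.2) = pvDiffWitnessOut_months_from_to_py.2 ∧ pvDiffWitnessOut_months_from_to_py.1 ≠ pvDiffWitnessOut_months_from_to_py.2
def Claim_exact_months_from_to_py : Prop := ∀ (start_year : Int) (start_month : Int) (end_year : Int) (end_month : Int), Dom_months_from_to_py start_year start_month end_year end_month → Pre_months_from_to_py start_year start_month end_year end_month → D_months_from_to_py start_year start_month end_year end_month → months_from_to_py start_year start_month end_year end_month ≠ months_from_to_py_alt start_year start_month end_year end_month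

-- ===== LEMMAS AND PROOFS =====

theorem flatMap_ext {α β : Type} (l : List α) (f g : α → List β)
    (h : ∀ a ∈ l, f a = g a) : l.flatMap f = l.flatMap g := by
  induction l with
  | nil => rfl
  | cons a t ih =>
    simp only [List.flatMap_cons, h a (List.mem_cons_self), ih fun x hx => h x (List.mem_cons_of_mem a hx)]

-- peel the first year off B's comprehension
theorem alt_unfold (ey em y m : Int) (h : y ≤ ey) :
    months_from_to_py_alt y m ey em =
      (((PySem.List.pyRange m 13 1).filter
          (fun mm => decide (mm ≤ (if y = ey then em else 12)))).map (fun mm => (y, mm))) ++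
        months_from_to_py_alt (y + 1) 1 ey em := by
  unfold months_from_to_py_alt
  rw [PySem.List.pyRange_one_cons (by omega : y < ey + 1), List.flatMap_cons]
  congr 1
  · simp
  · apply flatMap_ext
    intro z hz
    have hz1 : y + 1 ≤ z := ((PySem.List.mem_pyRange_one).mp hz).1
    have hne : z ≠ y := by omega
    simp [hne]

theorem alt_nil_of_gt (ey em y m : Int) (h : ey < y) :
    months_from_to_py_alt y m ey em = [] := by
  unfold months_from_to_py_alt
  rw [PySem.List.pyRange_one_eq_nil (by omega)]
  rfl

theorem alt_nil (ey em y m : Int) (h : ey < y ∨ (y = ey ∧ em < m)) :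
    months_from_to_py_alt y m ey em = [] := by
  rcases h with h | ⟨h1, h2⟩
  · exact alt_nil_of_gt ey em y m h
  · rw [alt_unfold ey em y m (le_of_eq h1), alt_nil_of_gt ey em (y + 1) 1 (by omega),
      List.append_nil]
    rw [List.map_eq_nil_iff, List.filter_eq_nil_iff]
    intro mm hmm
    have := (PySem.List.mem_pyRange_one).mp hmm
    simp only [if_pos h1, decide_eq_true_eq]
    omega

-- one unfolding step of A's loop
theorem loop_step (ey em : Int) (fuel : Nat) (y m : Int) (out : List (Int × Int)) :
    monthsLoopA ey em (fuel + 1) y m out =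
      if y < ey ∨ (y = ey ∧ m ≤ em) then
        if m + 1 > 12 then monthsLoopA ey em fuel (y + 1) 1 (out ++ [(y, m)])
        else monthsLoopA ey em fuel y (m + 1) (out ++ [(y, m)])
      else out := rfl

-- with the guard false the loop stops whatever the fuel
theorem loop_stop (ey em : Int) (fuel : Nat) (y m : Int) (out : List (Int × Int))
    (h : ¬(y < ey ∨ (y = ey ∧ m ≤ em))) : monthsLoopA ey em fuel y m out = out := by
  cases fuel with
  | zero => rfl
  | succ fuel => rw [loop_step, if_neg h]

-- main invariant: with enough fuel and a start month ≤ 12, A's loop appends exactly B's value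
theorem loopA_eq_alt (ey em : Int) :
    ∀ (fuel : Nat) (y m : Int) (out : List (Int × Int)),
      ((ey - y) * 14 + (14 - min m 13)).toNat < fuel → m ≤ 12 →
      monthsLoopA ey em fuel y m out = out ++ months_from_to_py_alt y m ey em := by
  intro fuel
  induction fuel with
  | zero => intro y m out hf; omega
  | succ fuel ih =>
    intro y m out hf hm
    rw [loop_step]
    by_cases hg : y < ey ∨ (y = ey ∧ m ≤ em)
    · have hy : y ≤ ey := by omega
      have hmhi : m ≤ (if y = ey then em else 12) := by
        split_ifs with h' <;> omega
      rw [if_pos hg, alt_unfold ey em y m hy]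
      by_cases hc : m + 1 > 12
      · have hm12 : m = 12 := by omega
        rw [ih (y + 1) 1 (out ++ [(y, m)]) (by omega) (by omega), hm12,
          show (13 : Int) = 12 + 1 from rfl, PySem.List.pyRange_one_singleton]
        have : decide ((12 : Int) ≤ (if y = ey then em else 12)) = true := by
          simp only [decide_eq_true_eq]
          omega
        simp [List.filter, this]
      · rw [if_neg hc, ih y (m + 1) (out ++ [(y, m)]) (by omega) (by omega),
          alt_unfold ey em y (m + 1) hy,
          PySem.List.pyRange_one_cons (by omega : m < 13), List.filter_cons_of_pos
            (by simp only [decide_eq_true_eq]; omega)]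
        simp
    · rw [if_neg hg, alt_nil ey em y m (by omega)]
      simp

-- every pair B emits carries a month ≤ 12
theorem mem_alt_month_le (ey em y m : Int) (p : Int × Int)
    (hp : p ∈ months_from_to_py_alt y m ey em) : p.2 ≤ 12 := by
  unfold months_from_to_py_alt at hp
  simp only [List.mem_flatMap, List.mem_map, List.mem_filter] at hp
  obtain ⟨z, _, mm, ⟨hmm, _⟩, rfl⟩ := hp
  have := (PySem.List.mem_pyRange_one).mp hmm
  omega

-- the accumulator only prefixes the loop's own output
theorem loop_out (ey em : Int) :
    ∀ (fuel : Nat) (y m : Int) (out : List (Int × Int)),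
      monthsLoopA ey em fuel y m out = out ++ monthsLoopA ey em fuel y m [] := by
  intro fuel
  induction fuel with
  | zero => intro y m out; simp [monthsLoopA]
  | succ fuel ih =>
    intro y m out
    rw [loop_step]
    conv_rhs => rw [loop_step]
    by_cases hg : y < ey ∨ (y = ey ∧ m ≤ em)
    · rw [if_pos hg, if_pos hg]
      by_cases hc : m + 1 > 12
      · rw [if_pos hc, if_pos hc, ih (y + 1) 1 (out ++ [(y, m)]), ih (y + 1) 1 ([] ++ [(y, m)])]
        simp
      · rw [if_neg hc, if_neg hc, ih y (m + 1) (out ++ [(y, m)]), ih y (m + 1) ([] ++ [(y, m)])]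
        simp
    · rw [if_neg hg, if_neg hg]
      simp

-- ===== VERDICT (by name: the statement is the Claim_ definition above) =====
theorem months_from_to_py_spec : Claim_unchanged_months_from_to_py := by
  intro sy sm ey em _dom hpre
  unfold Pre_months_from_to_py at hpre
  unfold Spec_months_from_to_py
  intro hnd
  unfold D_months_from_to_py at hnd
  by_cases hreach : sy < ey ∨ (sy = ey ∧ sm ≤ em)
  · have hsm : sm ≤ 12 := by
      by_contra hsm
      have hdiag : sy = ey ∧ sm = em := by
        by_contra hdg
        exact hnd ⟨by omega, hreach, hdg⟩
      exact hpre ⟨hdiag.1, hdiag.2, by omega⟩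
    unfold months_from_to_py
    rw [loopA_eq_alt ey em _ sy sm [] (by omega) hsm]
    simp
  · unfold months_from_to_py
    rw [loop_stop _ _ _ _ _ _ hreach, alt_nil ey em sy sm (by omega)]

theorem months_from_to_py_changed : Claim_changed_months_from_to_py := by
  unfold Claim_changed_months_from_to_py
  exact ⟨by decide, by decide, by decide, by decide, by decide, by decide⟩

theorem months_from_to_py_tight : Claim_exact_months_from_to_py := by
  intro sy sm ey em _dom _pre hd
  obtain ⟨hsm, hreach, _⟩ := hd
  intro heq
  have hmem : (sy, sm) ∈ months_from_to_py sy sm ey em := by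
    unfold months_from_to_py
    rw [loop_step, if_pos (by omega), if_pos (by omega),
      loop_out ey em _ (sy + 1) 1 ([] ++ [(sy, sm)])]
    simp
  rw [heq] at hmem
  have := mem_alt_month_le ey em sy sm (sy, sm) hmem
  omega
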